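-- pv_equiv track=rewrite | github.com/liangliangwei0208-rgb/AHNS | tools/premarket_estimator.py | _network_error_message
-- ===== SOURCE A (Python) =====
-- def _network_error_message(message: str) -> bool:
--     return any(
--         token in str(message)
--         for token in (
--             "SSLError",
--             "ProxyError",
--             "ConnectionError",
--             "ConnectTimeout",
--             "ReadTimeout",
--             "MaxRetryError",
--             "Max retries exceeded",
--         )
--     )
-- ===== SOURCE B (Python) =====
-- _TOKENS = (
--     "SSLError",
--     "ProxyError",
--     "ConnectionError",
--     "ConnectTimeout",
--     "ReadTimeout",
--     "MaxRetryError",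
--     "Max retries exceeded",
-- )
--
--
-- def _network_error_message(message: str) -> bool:
--     # Single left-to-right scan over positions; at each position try all tokens.
--     s = str(message)
--     return any(s.startswith(_TOKENS, i) for i in range(len(s) + 1))
-- ===== Notes on version B (the rewrite author's own statement) =====
-- stated objective: alternative
-- what changed: Replaces the token-major loop (one full substring search per token) with a single position-major scan of the string that tests all tokens at each offset via str.startswith with a tuple.
import Mathlib
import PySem

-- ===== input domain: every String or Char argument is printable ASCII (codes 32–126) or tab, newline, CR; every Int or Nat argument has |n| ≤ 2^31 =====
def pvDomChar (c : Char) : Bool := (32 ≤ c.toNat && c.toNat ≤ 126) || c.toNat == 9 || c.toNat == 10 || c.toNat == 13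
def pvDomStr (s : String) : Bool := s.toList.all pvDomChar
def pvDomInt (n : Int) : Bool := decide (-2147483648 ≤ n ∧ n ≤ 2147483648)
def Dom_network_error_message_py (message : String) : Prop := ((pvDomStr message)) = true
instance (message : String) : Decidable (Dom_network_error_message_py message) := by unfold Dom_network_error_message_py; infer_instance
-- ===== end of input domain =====

-- B replaces A's token-major loop (one substring search per token) with a single position-major
-- scan testing all tokens at each offset (alternative decomposition, same result).


-- ===== PORT A =====
-- any(token in str(message) for token in (...))
def pvTokens : List String :=
  ["SSLError", "ProxyError", "ConnectionError", "ConnectTimeout",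
   "ReadTimeout", "MaxRetryError", "Max retries exceeded"]

def network_error_message_py (message : String) : Bool :=
  pvTokens.any (fun token => PySem.Str.isIn token message)

-- ===== PORT B =====
-- s = str(message); any(s.startswith(_TOKENS, i) for i in range(len(s) + 1))
def network_error_message_py_alt (message : String) : Bool :=
  let s := message.toList
  (PySem.List.pyRange 0 ((s.length : Int) + 1) 1).any
    (fun i => pvTokens.any (fun t => PySem.Chars.startswith (s.drop i.toNat) t.toList))

-- ===== PRECONDITION & SPEC =====
def Spec_network_error_message_py (message : String) (out : Bool) : Prop := out = network_error_message_py_alt message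
instance (message : String) (out : Bool) : Decidable (Spec_network_error_message_py message out) := by unfold Spec_network_error_message_py; infer_instance

-- ===== CLAIM (what is proved, stated in full; the proofs are below) =====
def Claim_equal_network_error_message_py : Prop := ∀ (message : String), Dom_network_error_message_py message → Spec_network_error_message_py message (network_error_message_py message)

-- ===== LEMMAS AND PROOFS =====

-- key: a token occurs as a substring iff some admitted offset starts with it
theorem pv_key (s t : List Char) :
    (∃ i : Int, i ∈ PySem.List.pyRange 0 ((s.length : Int) + 1) 1 ∧
      PySem.Chars.startswith (s.drop i.toNat) t = true) ↔ PySem.Chars.isIn t s = true := by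
  constructor
  · rintro ⟨i, _, hsw⟩
    exact (PySem.Chars.exists_prefix_drop_iff_isIn t s).mp
      ⟨i.toNat, (PySem.Chars.startswith_iff _ _).mp hsw⟩
  · intro h
    obtain ⟨j, hj⟩ := (PySem.Chars.exists_prefix_drop_iff_isIn t s).mpr h
    refine ⟨(min j s.length : Nat), ?_, ?_⟩
    · rw [PySem.List.mem_pyRange_one]
      constructor
      · exact_mod_cast Nat.zero_le _
      · exact_mod_cast Nat.lt_succ_of_le (min_le_right _ _)
    · rw [PySem.Chars.startswith_iff]
      have : s.drop (min j s.length) = s.drop j ∨ (s.drop (min j s.length) = [] ∧ s.drop j = []) := by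
        rcases le_total j s.length with h' | h'
        · left; rw [min_eq_left h']
        · right
          constructor
          · rw [min_eq_right h']; simp
          · exact List.drop_eq_nil_of_le h'
      simp only [Int.toNat_natCast]
      rcases this with h' | ⟨h1, h2⟩
      · rw [h']; exact hj
      · rw [h1]; rw [h2] at hj; exact hj

theorem network_error_message_py_spec : Claim_equal_network_error_message_py := by
  intro message _
  unfold Spec_network_error_message_py network_error_message_py network_error_message_py_alt
  rw [Bool.eq_iff_iff]
  simp only [List.any_eq_true, PySem.Str.isIn_eq]
  constructor
  · rintro ⟨t, ht, hin⟩
    obtain ⟨i, hi, hsw⟩ := (pv_key message.toList t.toList).mpr hin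
    exact ⟨i, hi, t, ht, hsw⟩
  · rintro ⟨i, hi, t, ht, hsw⟩
    exact ⟨t, ht, (pv_key message.toList t.toList).mp ⟨i, hi, hsw⟩⟩
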